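-- pv_equiv track=rewrite | github.com/Aryanmishra-dev/Project-Z | packages/nlp-service/app/services/text_chunker.py | _get_overlap_sentences
-- ===== SOURCE A (Python) =====
-- def _get_overlap_sentences(
--
--     sentences: list[str],
--     target_words: int
-- ) -> list[str]:
--     """
--     Get sentences from the end that total approximately target_words.
--
--     Args:
--         sentences: List of sentences
--         target_words: Target word count for overlap
--
--     Returns:
--         List of sentences for overlap
--     """
--     overlap: list[str] = []
--     word_count = 0
--
--     for sentence in reversed(sentences):
--         sentence_words = len(sentence.split())
--         if word_count + sentence_words > target_words and overlap:
--             break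
--         overlap.insert(0, sentence)
--         word_count += sentence_words
--
--     return overlap
-- ===== SOURCE B (Python) =====
-- def _suffix_word_counts(sentences):
--     # suffix[i] = total words in sentences[i:]; length len(sentences)+1, last entry 0
--     rev = [0]
--     total = 0
--     for s in reversed(sentences):
--         total += len(s.split())
--         rev.append(total)
--     rev.reverse()
--     return rev
--
-- def _get_overlap_sentences(sentences, target_words):
--     n = len(sentences)
--     if n == 0:
--         return []
--     suffix = _suffix_word_counts(sentences)
--     # smallest start whose suffix fits the target; the last sentence is always kept
--     start = next((i for i in range(n - 1) if suffix[i] <= target_words), n - 1)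
--     return sentences[start:]
-- ===== Notes on version B (the rewrite author's own statement) =====
-- stated objective: faster
-- what changed: Replaces A's reversed greedy loop that front-inserts sentences and breaks on overflow with a suffix word-count table built in one pass, a first-index-whose-suffix-fits search (last sentence kept as the fallback), and a single slice sentences[start:].
import Mathlib
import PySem

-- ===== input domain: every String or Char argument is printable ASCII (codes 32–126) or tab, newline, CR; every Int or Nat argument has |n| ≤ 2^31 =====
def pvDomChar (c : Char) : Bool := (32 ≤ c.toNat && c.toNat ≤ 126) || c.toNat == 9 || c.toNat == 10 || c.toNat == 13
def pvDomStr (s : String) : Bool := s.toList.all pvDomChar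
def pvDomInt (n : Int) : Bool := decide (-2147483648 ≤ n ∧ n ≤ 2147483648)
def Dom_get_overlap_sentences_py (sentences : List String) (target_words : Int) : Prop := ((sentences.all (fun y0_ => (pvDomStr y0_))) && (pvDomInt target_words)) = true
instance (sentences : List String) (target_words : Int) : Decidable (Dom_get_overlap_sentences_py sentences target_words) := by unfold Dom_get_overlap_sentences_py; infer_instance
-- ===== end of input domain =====

-- B replaces A's reversed greedy loop (which front-inserts into a growing list and breaks on
-- overflow) by a one-pass suffix word-count table, a first-fitting-start search and one slice;
-- objective: faster (a timing run measured B faster at the largest sizes).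

-- len(s.split()) as an Int, shared by both ports
def pvWC (s : String) : Int := ((PySem.Str.split₀ s).length : Int)

-- ===== PORT A =====
-- the reversed for-loop of A: state = (overlap, word_count); `break` = return overlap
def pvALoop (t : Int) : List String → List String → Int → List String
  | [], ov, _ => ov
  | s :: rest, ov, wc =>
    let sw := pvWC s
    if wc + sw > t ∧ ov ≠ [] then ov
    else pvALoop t rest (s :: ov) (wc + sw)

def get_overlap_sentences_py (sentences : List String) (target_words : Int) : List String :=
  pvALoop target_words sentences.reverse [] 0

-- ===== PORT B =====
-- the for-loop of _suffix_word_counts: state = (rev, total), appends total+words to rev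
def pvSufLoop : List String → List Int → Int → List Int
  | [], rev, _ => rev
  | s :: r, rev, total => pvSufLoop r (rev ++ [total + pvWC s]) (total + pvWC s)

-- _suffix_word_counts: build rev over reversed(sentences), then reverse it in place
def pvSufCounts (sentences : List String) : List Int :=
  (pvSufLoop sentences.reverse [0] 0).reverse

def get_overlap_sentences_py_alt (sentences : List String) (target_words : Int) : List String :=
  let n := sentences.length
  if n = 0 then []
  else
    let suffix := pvSufCounts sentences
    -- next((i for i in range(n-1) if suffix[i] <= target_words), n-1)
    let start := ((suffix.take (n - 1)).findIdx? (fun v => v ≤ target_words)).getD (n - 1)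
    -- sentences[start:] with 0 ≤ start ≤ n: exactly List.drop
    sentences.drop start

-- ===== PRECONDITION & SPEC =====
def Spec_get_overlap_sentences_py (sentences : List String) (target_words : Int) (out : List String) : Prop := out = get_overlap_sentences_py_alt sentences target_words
instance (sentences : List String) (target_words : Int) (out : List String) : Decidable (Spec_get_overlap_sentences_py sentences target_words out) := by unfold Spec_get_overlap_sentences_py; infer_instance

-- ===== CLAIM (what is proved, stated in full; the proofs are below) =====
def Claim_equal_get_overlap_sentences_py : Prop := ∀ (sentences : List String) (target_words : Int), Dom_get_overlap_sentences_py sentences target_words → Spec_get_overlap_sentences_py sentences target_words (get_overlap_sentences_py sentences target_words)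

-- ===== LEMMAS AND PROOFS =====

def pvWSum (l : List String) : Int := (l.map pvWC).sum

theorem pvWC_nonneg (s : String) : 0 ≤ pvWC s := by
  simp [pvWC]

theorem pvWSum_nonneg (l : List String) : 0 ≤ pvWSum l := by
  induction l with
  | nil => simp [pvWSum]
  | cons a r ih =>
    have := pvWC_nonneg a
    simp only [pvWSum, List.map_cons, List.sum_cons] at *
    linarith

theorem pvWSum_cons (a : String) (l : List String) : pvWSum (a :: l) = pvWC a + pvWSum l := by
  simp [pvWSum]

theorem pvWSum_reverse (l : List String) : pvWSum l.reverse = pvWSum l := by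
  simp [pvWSum]

-- loop-splitting lemma: processing ys ++ [y] with a nonempty accumulator
theorem pvALoop_append (t : Int) (ys : List String) (y : String) :
    ∀ ov wc, ov ≠ [] →
    pvALoop t (ys ++ [y]) ov wc =
      if wc + pvWSum ys + pvWC y ≤ t then y :: ys.reverse ++ ov else pvALoop t ys ov wc := by
  induction ys with
  | nil =>
    intro ov wc hov
    simp only [List.nil_append, pvALoop, pvWSum, List.map_nil, List.sum_nil,
      List.reverse_nil]
    by_cases hc : wc + pvWC y ≤ t
    · rw [if_neg (by rintro ⟨a, -⟩; omega), if_pos (by omega)]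
      rfl
    · rw [if_pos ⟨by omega, hov⟩, if_neg (by omega)]
  | cons s rest ih =>
    intro ov wc hov
    simp only [List.cons_append, pvALoop]
    by_cases hb : t < wc + pvWC s ∧ ov ≠ []
    · rw [if_pos hb, if_pos hb, if_neg]
      have h1 := pvWSum_nonneg rest
      have h2 := pvWC_nonneg y
      rw [pvWSum_cons]
      have h3 := hb.1
      omega
    · rw [if_neg hb, if_neg hb, ih (s :: ov) (wc + pvWC s) (by simp), pvWSum_cons]
      by_cases hle : wc + (pvWC s + pvWSum rest) + pvWC y ≤ t
      · rw [if_pos (by omega), if_pos hle]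
        simp
      · rw [if_neg (by omega), if_neg hle]

-- A's recursion in terms of the total word sum
theorem pvA_cons (t : Int) (x : String) (xs : List String) (hxs : xs ≠ []) :
    get_overlap_sentences_py (x :: xs) t =
      if pvWSum (x :: xs) ≤ t then x :: xs else get_overlap_sentences_py xs t := by
  obtain ⟨w, rest, hrev⟩ : ∃ w rest, xs.reverse = w :: rest := by
    cases h : xs.reverse with
    | nil => exact absurd (by simpa using congrArg List.reverse h) hxs
    | cons a b => exact ⟨a, b, rfl⟩
  have hxsum : pvWSum xs = pvWC w + pvWSum rest := by
    rw [← pvWSum_reverse xs, hrev, pvWSum_cons]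
  have hgen : ∀ l, pvALoop t (w :: l) [] 0 = pvALoop t l [w] (pvWC w) := by
    intro l
    simp [pvALoop]
  have hback : rest.reverse ++ [w] = xs := by
    rw [← List.reverse_cons, ← hrev, List.reverse_reverse]
  unfold get_overlap_sentences_py
  rw [show (x :: xs).reverse = w :: (rest ++ [x]) by simp [hrev], hgen,
      pvALoop_append t rest x [w] (pvWC w) (by simp), hrev, hgen, pvWSum_cons, hxsum]
  by_cases h : pvWC w + pvWSum rest + pvWC x ≤ t
  · rw [if_pos (by omega), if_pos (by omega), List.cons_append, hback]
  · rw [if_neg (by omega), if_neg (by omega)]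

-- the reversed contents of pvSufLoop's accumulator, cons-built (proof-side mirror)
def pvR : List String → Int → List Int
  | [], _ => []
  | s :: r, tot => pvR r (tot + pvWC s) ++ [tot + pvWC s]

theorem pvSufLoop_reverse (ys : List String) :
    ∀ rev tot, (pvSufLoop ys rev tot).reverse = pvR ys tot ++ rev.reverse := by
  induction ys with
  | nil => intro rev tot; simp [pvSufLoop, pvR]
  | cons s r ih =>
    intro rev tot
    simp only [pvSufLoop, pvR, ih, List.reverse_append]
    simp

theorem pvR_append (ys : List String) (y : String) :
    ∀ tot, pvR (ys ++ [y]) tot = (tot + pvWSum ys + pvWC y) :: pvR ys tot := by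
  induction ys with
  | nil => intro tot; simp [pvR, pvWSum]
  | cons s r ih =>
    intro tot
    simp only [List.cons_append, pvR, ih, pvWSum_cons, List.cons_append]
    congr 1
    ring

theorem pvSufCounts_cons (x : String) (xs : List String) :
    pvSufCounts (x :: xs) = pvWSum (x :: xs) :: pvSufCounts xs := by
  unfold pvSufCounts
  rw [pvSufLoop_reverse, pvSufLoop_reverse, List.reverse_cons, pvR_append, List.cons_append,
      pvWSum_reverse, pvWSum_cons]
  congr 1
  ring

-- B's recursion in terms of the total word sum
theorem pvB_cons (t : Int) (x : String) (xs : List String) (hxs : xs ≠ []) :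
    get_overlap_sentences_py_alt (x :: xs) t =
      if pvWSum (x :: xs) ≤ t then x :: xs else get_overlap_sentences_py_alt xs t := by
  obtain ⟨x', xs', rfl⟩ : ∃ a b, xs = a :: b := by
    cases xs with
    | nil => exact absurd rfl hxs
    | cons a b => exact ⟨a, b, rfl⟩
  have hsuf := pvSufCounts_cons x (x' :: xs')
  by_cases h : pvWSum (x :: x' :: xs') ≤ t
  · rw [if_pos h]
    simp only [get_overlap_sentences_py_alt, List.length_cons]
    rw [if_neg (by omega), hsuf]
    simp only [Nat.add_sub_cancel, List.take_succ_cons, List.findIdx?_cons]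
    rw [if_pos (by simpa using h)]
    simp
  · rw [if_neg h]
    simp only [get_overlap_sentences_py_alt, List.length_cons]
    rw [if_neg (by omega), if_neg (by omega), hsuf]
    simp only [Nat.add_sub_cancel, List.take_succ_cons, List.findIdx?_cons]
    rw [if_neg (by simpa using h)]
    cases hfi : ((pvSufCounts (x' :: xs')).take xs'.length).findIdx? (fun v => decide (v ≤ t)) with
    | none => simp [List.drop_succ_cons]
    | some j => simp [List.drop_succ_cons]

theorem pvAB (xs : List String) (t : Int) :
    get_overlap_sentences_py xs t = get_overlap_sentences_py_alt xs t := by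
  induction xs with
  | nil => rfl
  | cons x xs ih =>
    cases hxs : xs with
    | nil =>
      simp [get_overlap_sentences_py, get_overlap_sentences_py_alt, pvALoop]
    | cons a b =>
      rw [← hxs, pvA_cons t x xs (by simp [hxs]), pvB_cons t x xs (by simp [hxs]), ih]

-- ===== VERDICT (by name: the statement is the Claim_ definition above) =====
theorem get_overlap_sentences_py_spec : Claim_equal_get_overlap_sentences_py := by
  intro sentences target_words _
  exact pvAB sentences target_words
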